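-- pv_equiv track=rewrite | github.com/yungangwu/RL | ddz/app/ddz/game/utils.py | action_index_to_sequence_cards
-- ===== SOURCE A (Python) =====
-- def action_index_to_sequence_cards(action_index, start, minlength, maxlength):
--     total_length = 12 - (start - 1)
--     total_length = total_length if total_length <= maxlength else maxlength
--     total_length = total_length - (minlength - 1)
--     if action_index <= total_length:
--         return start, minlength + action_index - 1
--     else:
--         return action_index_to_sequence_cards(action_index - total_length, start + 1, minlength, maxlength)
-- ===== SOURCE B (Python) =====
-- def action_index_to_sequence_cards(action_index, start, minlength, maxlength):
--     # Skip the whole constant-width region (every start <= 13 - maxlength offers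
--     # maxlength - minlength + 1 sequences) in one arithmetic jump, then walk the
--     # short shrinking tail with a flat loop instead of recursion.
--     width = maxlength - minlength + 1
--     flat_end = 13 - maxlength
--     if start <= flat_end and width >= 1 and action_index > width:
--         jump = min((action_index - 1) // width, flat_end - start + 1)
--         action_index -= jump * width
--         start += jump
--     while True:
--         total = min(13 - start, maxlength) - minlength + 1
--         if action_index <= total:
--             return (start, minlength + action_index - 1)
--         action_index -= total
--         start += 1
-- ===== Notes on version B (the rewrite author's own statement) =====
-- stated objective: alternative
-- what changed: Replaces A's one-call-per-index recursion by an arithmetic jump (integer division) that crosses the entire constant-width region of starts in O(1), followed by a flat while-loop over the short shrinking tail.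
import Mathlib
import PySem

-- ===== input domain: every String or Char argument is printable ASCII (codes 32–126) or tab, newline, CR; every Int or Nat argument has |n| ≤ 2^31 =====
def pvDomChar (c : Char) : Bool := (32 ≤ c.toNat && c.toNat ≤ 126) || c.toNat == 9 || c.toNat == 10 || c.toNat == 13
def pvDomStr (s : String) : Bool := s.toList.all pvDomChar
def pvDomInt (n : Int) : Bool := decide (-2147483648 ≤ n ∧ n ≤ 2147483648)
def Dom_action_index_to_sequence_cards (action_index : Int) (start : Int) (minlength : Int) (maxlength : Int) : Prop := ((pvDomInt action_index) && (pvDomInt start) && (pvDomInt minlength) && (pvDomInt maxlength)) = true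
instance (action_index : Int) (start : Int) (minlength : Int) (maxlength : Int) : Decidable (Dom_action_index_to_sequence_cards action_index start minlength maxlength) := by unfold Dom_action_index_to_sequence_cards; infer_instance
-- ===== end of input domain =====

-- B replaces A's one-step-per-index recursion by an O(1) arithmetic jump over the
-- constant-width region followed by a flat loop over the short shrinking tail (alternative).

-- ===== PORT A =====
-- A's recursion line by line; the fuel argument only makes the definition total
-- (inside Pre_ the recursion depth is below the fuel, so the 0-case is unreachable).
def action_index_to_sequence_cards_go (fuel : Nat) (action_index : Int) (start : Int) (minlength : Int) (maxlength : Int) : Int × Int :=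
  match fuel with
  | 0 => (start, minlength + action_index - 1)  -- unreachable inside Pre_
  | fuel + 1 =>
    let total_length := 12 - (start - 1)
    let total_length := if total_length ≤ maxlength then total_length else maxlength
    let total_length := total_length - (minlength - 1)
    if action_index ≤ total_length then (start, minlength + action_index - 1)
    else action_index_to_sequence_cards_go fuel (action_index - total_length) (start + 1) minlength maxlength

def action_index_to_sequence_cards (action_index : Int) (start : Int) (minlength : Int) (maxlength : Int) : Int × Int :=
  action_index_to_sequence_cards_go ((13 - minlength - start).toNat + 1) action_index start minlength maxlength

-- ===== PORT B =====
-- Source B's while-loop, with the same totalising fuel guard (unreachable inside Pre_).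
def pvAltLoop (fuel : Nat) (action_index : Int) (start : Int) (minlength : Int) (maxlength : Int) : Int × Int :=
  match fuel with
  | 0 => (start, minlength + action_index - 1)  -- unreachable inside Pre_
  | fuel + 1 =>
    let total := min (13 - start) maxlength - minlength + 1
    if action_index ≤ total then (start, minlength + action_index - 1)
    else pvAltLoop fuel (action_index - total) (start + 1) minlength maxlength

def action_index_to_sequence_cards_alt (action_index : Int) (start : Int) (minlength : Int) (maxlength : Int) : Int × Int :=
  let width := maxlength - minlength + 1
  let flat_end := 13 - maxlength
  if start ≤ flat_end ∧ 1 ≤ width ∧ width < action_index then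
    let jump := min (PySem.Int.floordiv (action_index - 1) width) (flat_end - start + 1)
    pvAltLoop ((13 - minlength - (start + jump)).toNat + 1) (action_index - jump * width) (start + jump) minlength maxlength
  else
    pvAltLoop ((13 - minlength - start).toNat + 1) action_index start minlength maxlength

-- ===== PRECONDITION & SPEC =====
-- Pre_ excludes exactly the inputs on which A's recursion never reaches its base case —
-- action_index exceeds the total number of sequences available from this start, so the
-- per-start count eventually turns non-positive and A descends forever, raising
-- RecursionError; B's while-loop likewise never returns there.  Pre_ is the closed-form
-- termination condition: action_index fits in the current block, or the parameters admit
-- at least one sequence and action_index is at most the total capacity (stated doubled to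
-- avoid division: flat region plus triangular tail, or triangular tail alone).
def Pre_action_index_to_sequence_cards (action_index : Int) (start : Int) (minlength : Int) (maxlength : Int) : Prop :=
  action_index ≤ min (13 - start) maxlength - minlength + 1 ∨
  (minlength ≤ maxlength ∧ start ≤ 13 - minlength ∧
    (if start ≤ 13 - maxlength
     then 2 * action_index ≤ 2 * (13 - maxlength - start + 1) * (maxlength - minlength + 1)
            + (maxlength - minlength) * (maxlength - minlength + 1)
     else 2 * action_index ≤ (14 - minlength - start) * (15 - minlength - start)))
instance (action_index : Int) (start : Int) (minlength : Int) (maxlength : Int) : Decidable (Pre_action_index_to_sequence_cards action_index start minlength maxlength) := by unfold Pre_action_index_to_sequence_cards; infer_instance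

def pvWitness_action_index_to_sequence_cards : Int × Int × Int × Int := (3, 2, 1, 4)

def Spec_action_index_to_sequence_cards (action_index : Int) (start : Int) (minlength : Int) (maxlength : Int) (out : Int × Int) : Prop := out = action_index_to_sequence_cards_alt action_index start minlength maxlength
instance (action_index : Int) (start : Int) (minlength : Int) (maxlength : Int) (out : Int × Int) : Decidable (Spec_action_index_to_sequence_cards action_index start minlength maxlength out) := by unfold Spec_action_index_to_sequence_cards; infer_instance

-- ===== CLAIM (what is proved, stated in full; the proofs are below) =====
def Claim_equal_action_index_to_sequence_cards : Prop := ∀ (action_index : Int) (start : Int) (minlength : Int) (maxlength : Int), Dom_action_index_to_sequence_cards action_index start minlength maxlength → Pre_action_index_to_sequence_cards action_index start minlength maxlength → Spec_action_index_to_sequence_cards action_index start minlength maxlength (action_index_to_sequence_cards action_index start minlength maxlength)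

-- ===== LEMMAS AND PROOFS =====

-- the per-step sequence count, as B writes it
def pvTlen (start minlength maxlength : Int) : Int := min (13 - start) maxlength - minlength + 1

-- A's three-assignment total_length equals B's min expression
lemma pvTlen_eq (s minl maxl : Int) :
    (if 12 - (s - 1) ≤ maxl then 12 - (s - 1) else maxl) - (minl - 1) = pvTlen s minl maxl := by
  unfold pvTlen; rw [min_def]; split_ifs <;> omega

-- one unfolding of A's recursion, phrased with pvTlen
lemma goA_succ (f : Nat) (a s minl maxl : Int) :
    action_index_to_sequence_cards_go (f + 1) a s minl maxl =
      if a ≤ pvTlen s minl maxl then (s, minl + a - 1)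
      else action_index_to_sequence_cards_go f (a - pvTlen s minl maxl) (s + 1) minl maxl := by
  simp only [action_index_to_sequence_cards_go]
  rw [pvTlen_eq]

-- L1: the two loops are extensionally equal (same step, same fuel fallback)
lemma loop_eq_goA (f : Nat) : ∀ (a s minl maxl : Int),
    pvAltLoop f a s minl maxl = action_index_to_sequence_cards_go f a s minl maxl := by
  induction f with
  | zero => intro a s minl maxl; rfl
  | succ f ih =>
    intro a s minl maxl
    rw [goA_succ]
    simp only [pvAltLoop, pvTlen]
    split
    · rfl
    · exact ih _ _ _ _

-- L2: j consecutive steps of A in the constant-width region collapse to one subtraction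
lemma goA_jump (j : Nat) : ∀ (f : Nat) (a s minl maxl : Int),
    (∀ i : Nat, i < j → s + (i : Int) ≤ 13 - maxl) →
    (∀ i : Nat, i < j → ((i : Int) + 1) * (maxl - minl + 1) < a) →
    action_index_to_sequence_cards_go (f + j) a s minl maxl =
      action_index_to_sequence_cards_go f (a - (j : Int) * (maxl - minl + 1)) (s + (j : Int)) minl maxl := by
  induction j with
  | zero => intro f a s minl maxl _ _; norm_num
  | succ j ih =>
    intro f a s minl maxl hflat hbig
    have h0 : s ≤ 13 - maxl := by simpa using hflat 0 (Nat.succ_pos j)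
    have hT : pvTlen s minl maxl = maxl - minl + 1 := by
      unfold pvTlen; rw [min_def]; split_ifs <;> omega
    have ha : ¬ a ≤ pvTlen s minl maxl := by
      have := hbig 0 (Nat.succ_pos j)
      push_cast at this; omega
    have : f + (j + 1) = (f + j) + 1 := by omega
    rw [this, goA_succ, if_neg ha, hT]
    rw [ih f (a - (maxl - minl + 1)) (s + 1) minl maxl
      (by intro i hi; have := hflat (i + 1) (by omega); push_cast at this ⊢; omega)
      (by intro i hi; have := hbig (i + 1) (by omega); push_cast at this ⊢; nlinarith)]
    congr 1 <;> push_cast <;> ring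

-- bounded-termination certificate: the loop reaches its base case within d steps
def pvTerm (d : Nat) (a s minl maxl : Int) : Bool :=
  match d with
  | 0 => a ≤ pvTlen s minl maxl
  | d + 1 => a ≤ pvTlen s minl maxl || pvTerm d (a - pvTlen s minl maxl) (s + 1) minl maxl

-- L3: with a termination certificate, the fuel value is irrelevant (above the depth)
lemma goA_fuel_stable (d : Nat) : ∀ (f g : Nat) (a s minl maxl : Int),
    pvTerm d a s minl maxl = true → d < f → d < g →
    action_index_to_sequence_cards_go f a s minl maxl =
      action_index_to_sequence_cards_go g a s minl maxl := by
  induction d with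
  | zero =>
    intro f g a s minl maxl ht hf hg
    obtain ⟨f', rfl⟩ : ∃ f', f = f' + 1 := ⟨f - 1, by omega⟩
    obtain ⟨g', rfl⟩ : ∃ g', g = g' + 1 := ⟨g - 1, by omega⟩
    simp only [pvTerm, decide_eq_true_eq] at ht
    rw [goA_succ, goA_succ, if_pos ht, if_pos ht]
  | succ d ih =>
    intro f g a s minl maxl ht hf hg
    obtain ⟨f', rfl⟩ : ∃ f', f = f' + 1 := ⟨f - 1, by omega⟩
    obtain ⟨g', rfl⟩ : ∃ g', g = g' + 1 := ⟨g - 1, by omega⟩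
    rw [goA_succ, goA_succ]
    by_cases hc : a ≤ pvTlen s minl maxl
    · rw [if_pos hc, if_pos hc]
    · rw [if_neg hc, if_neg hc]
      simp only [pvTerm, Bool.or_eq_true, decide_eq_true_eq] at ht
      exact ih f' g' _ _ _ _ (ht.resolve_left hc) (by omega) (by omega)

-- sum of pvTlen over n consecutive starts
def pvSum (n : Nat) (s minl maxl : Int) : Int :=
  match n with
  | 0 => 0
  | n + 1 => pvTlen s minl maxl + pvSum n (s + 1) minl maxl

-- an index within the next n+1 blocks terminates within n steps
lemma pvTerm_of_le_sum (n : Nat) : ∀ (a s minl maxl : Int),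
    a ≤ pvSum (n + 1) s minl maxl → pvTerm n a s minl maxl = true := by
  induction n with
  | zero =>
    intro a s minl maxl h
    simp only [pvSum, add_zero] at h
    simp [pvTerm, h]
  | succ n ih =>
    intro a s minl maxl h
    simp only [pvTerm, Bool.or_eq_true, decide_eq_true_eq]
    by_cases hc : a ≤ pvTlen s minl maxl
    · exact Or.inl hc
    · refine Or.inr (ih _ _ _ _ ?_)
      simp only [pvSum] at h ⊢
      omega

-- doubled closed form of pvSum on the shrinking tail
lemma pvSum_tail (m : Nat) : ∀ (s minl maxl : Int), 13 - s ≤ maxl →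
    2 * pvSum m s minl maxl = (m : Int) * (2 * (14 - minl - s) - ((m : Int) - 1)) := by
  induction m with
  | zero => intro s minl maxl _; simp [pvSum]
  | succ m ih =>
    intro s minl maxl hs
    have hT : pvTlen s minl maxl = 14 - minl - s := by
      unfold pvTlen; rw [min_def]; split_ifs <;> omega
    simp only [pvSum, hT]
    rw [mul_add, ih (s + 1) minl maxl (by omega)]
    push_cast; ring

-- main bridge: inside Pre_, A's fuelled recursion equals B's jump-then-loop
lemma pv_main (a s minl maxl : Int)
    (hpre : Pre_action_index_to_sequence_cards a s minl maxl) :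
    action_index_to_sequence_cards_go ((13 - minl - s).toNat + 1) a s minl maxl =
      action_index_to_sequence_cards_alt a s minl maxl := by
  simp only [action_index_to_sequence_cards_alt]
  by_cases hc : s ≤ 13 - maxl ∧ 1 ≤ maxl - minl + 1 ∧ maxl - minl + 1 < a
  · rw [if_pos hc, loop_eq_goA]
    obtain ⟨hs, hw, ha⟩ := hc
    have hwpos : (0 : Int) < maxl - minl + 1 := by omega
    have hT : pvTlen s minl maxl = maxl - minl + 1 := by
      unfold pvTlen; rw [min_def]; split_ifs <;> omega
    have hnot : ¬ a ≤ pvTlen s minl maxl := by omega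
    rcases hpre with h1 | ⟨hml, hsL, hcap0⟩
    · exact absurd (by unfold pvTlen at hnot; omega : False) id
    rw [if_pos hs] at hcap0
    have hfuelA : ((13 - minl - s).toNat : Int) = 13 - minl - s := Int.toNat_of_nonneg (by omega)
    have hq1 : PySem.Int.floordiv (a - 1) (maxl - minl + 1) * (maxl - minl + 1) ≤ a - 1 :=
      (PySem.Int.le_floordiv_iff_mul_le hwpos).mp le_rfl
    have hq2 : a - 1 < (PySem.Int.floordiv (a - 1) (maxl - minl + 1) + 1) * (maxl - minl + 1) :=
      (PySem.Int.floordiv_lt_iff_lt_mul hwpos).mp (lt_add_one _)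
    have hq0 : 1 ≤ PySem.Int.floordiv (a - 1) (maxl - minl + 1) :=
      (PySem.Int.le_floordiv_iff_mul_le hwpos).mpr (by omega)
    set k := 13 - maxl - s + 1 with hkdef
    by_cases hin : a ≤ k * (maxl - minl + 1)
    · -- the index is resolved inside the constant-width region
      have hqk : PySem.Int.floordiv (a - 1) (maxl - minl + 1) < k :=
        (PySem.Int.floordiv_lt_iff_lt_mul hwpos).mpr (by omega)
      rw [min_eq_left (le_of_lt hqk)]
      set q := PySem.Int.floordiv (a - 1) (maxl - minl + 1) with hqdef
      have hjn : ((q.toNat : Int)) = q := Int.toNat_of_nonneg (by omega)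
      have hfuel : (13 - minl - s).toNat + 1 = ((13 - minl - s).toNat + 1 - q.toNat) + q.toNat := by
        omega
      rw [hfuel, goA_jump q.toNat _ a s minl maxl
        (by intro i hi
            have : (i : Int) < q := by exact_mod_cast Int.lt_of_lt_of_le (by exact_mod_cast hi) (le_of_eq hjn)
            omega)
        (by intro i hi
            have h1 : (i : Int) + 1 ≤ q := by
              have : (i : Int) < q := by exact_mod_cast Int.lt_of_lt_of_le (by exact_mod_cast hi) (le_of_eq hjn)
              omega
            nlinarith)]
      rw [hjn]
      -- after the jump the index fits in the current block: depth 0 remains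
      have hT' : pvTlen (s + q) minl maxl = maxl - minl + 1 := by
        unfold pvTlen; rw [min_def]; split_ifs <;> omega
      have hterm : pvTerm 0 (a - q * (maxl - minl + 1)) (s + q) minl maxl = true := by
        simp only [pvTerm, hT', decide_eq_true_eq]; nlinarith
      exact goA_fuel_stable 0 _ _ _ _ _ _ hterm (by omega) (by omega)
    · -- the index lands in the shrinking tail: jump exactly to its first start
      have hkq : k ≤ PySem.Int.floordiv (a - 1) (maxl - minl + 1) :=
        (PySem.Int.le_floordiv_iff_mul_le hwpos).mpr (by nlinarith)
      rw [min_eq_right hkq]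
      have hk1 : 1 ≤ k := by omega
      -- the tail subcase forces at least two sequence lengths: otherwise the flat
      -- capacity already covers action_index, contradicting hin
      have hu : 1 ≤ maxl - minl := by
        by_contra hcon
        have h0 : maxl - minl = 0 := by omega
        rw [h0] at hcap0 hin
        simp at hcap0 hin
        omega
      have hjn : ((k.toNat : Int)) = k := Int.toNat_of_nonneg (by omega)
      set n := (maxl - minl - 1).toNat with hndef
      have hsum : 2 * pvSum (n + 1) (s + k) minl maxl = (maxl - minl) * (maxl - minl + 1) := by
        rw [pvSum_tail (n + 1) (s + k) minl maxl (by omega)]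
        by_cases h : minl < maxl
        · have hn : ((n : Int)) = maxl - minl - 1 := by omega
          push_cast
          rw [hn, hkdef]
          ring
        · have hml2 : maxl = minl := by omega
          have hn0 : ((n : Int)) = 0 := by omega
          push_cast
          rw [hn0, hkdef, hml2]
          ring
      have hle : a - k * (maxl - minl + 1) ≤ pvSum (n + 1) (s + k) minl maxl := by
        linarith [hcap0, hsum]
      have hterm : pvTerm n (a - k * (maxl - minl + 1)) (s + k) minl maxl = true :=
        pvTerm_of_le_sum n _ _ _ _ hle
      have hfuel : (13 - minl - s).toNat + 1 = ((13 - minl - s).toNat + 1 - k.toNat) + k.toNat := by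
        omega
      rw [hfuel, goA_jump k.toNat _ a s minl maxl
        (by intro i hi
            have : (i : Int) < k := by exact_mod_cast Int.lt_of_lt_of_le (by exact_mod_cast hi) (le_of_eq hjn)
            omega)
        (by intro i hi
            have h1 : (i : Int) + 1 ≤ k := by
              have : (i : Int) < k := by exact_mod_cast Int.lt_of_lt_of_le (by exact_mod_cast hi) (le_of_eq hjn)
              omega
            nlinarith)]
      rw [hjn]
      have hb1 : n < (13 - minl - s).toNat + 1 - k.toNat := by omega
      have hb2 : n < (13 - minl - (s + k)).toNat + 1 := by omega
      exact goA_fuel_stable n _ _ _ _ _ _ hterm hb1 hb2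
  · rw [if_neg hc, loop_eq_goA]

-- ===== VERDICT (by name: the statement is the Claim_ definition above) =====
theorem action_index_to_sequence_cards_spec : Claim_equal_action_index_to_sequence_cards := by
  intro a s minl maxl _ hpre
  unfold Spec_action_index_to_sequence_cards action_index_to_sequence_cards
  exact pv_main a s minl maxl hpre
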